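-- pv_equiv track=rewrite | github.com/texterok/talents-navigator | scripts/extract_combinations.py | normalize_theme
-- ===== SOURCE A (Python) =====
-- RU_TO_EN = {}
--
-- VALID_EN = {
--     "Achiever", "Activator", "Adaptability", "Analytical", "Arranger", "Belief",
--     "Command", "Communication", "Competition", "Connectedness", "Consistency", "Context",
--     "Deliberative", "Developer", "Discipline", "Empathy", "Focus", "Futuristic",
--     "Harmony", "Ideation", "Includer", "Individualization", "Input", "Intellection",
--     "Learner", "Maximizer", "Positivity", "Relator", "Responsibility", "Restorative",
--     "Self-Assurance", "Significance", "Strategic", "Woo",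
-- }
--
-- def normalize_theme(name: str) -> str | None:
--     name = name.strip()
--     if not name:
--         return None
--     if name in VALID_EN:
--         return name
--     if name in RU_TO_EN:
--         return RU_TO_EN[name]
--     for ru, en in RU_TO_EN.items():
--         if ru.lower() == name.lower():
--             return en
--     for en in VALID_EN:
--         if en.lower() == name.lower():
--             return en
--     return None
-- ===== SOURCE B (Python) =====
-- VALID_EN = {
--     "Achiever", "Activator", "Adaptability", "Analytical", "Arranger", "Belief",
--     "Command", "Communication", "Competition", "Connectedness", "Consistency", "Context",
--     "Deliberative", "Developer", "Discipline", "Empathy", "Focus", "Futuristic",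
--     "Harmony", "Ideation", "Includer", "Individualization", "Input", "Intellection",
--     "Learner", "Maximizer", "Positivity", "Relator", "Responsibility", "Restorative",
--     "Self-Assurance", "Significance", "Strategic", "Woo",
-- }
--
-- # Sorted table of (lowercase key, canonical theme), built once at import time.
-- SORTED_PAIRS = sorted((t.lower(), t) for t in VALID_EN)
--
-- def normalize_theme(name: str) -> str | None:
--     key = name.strip().lower()
--     lo, hi = 0, len(SORTED_PAIRS)
--     while lo < hi:
--         mid = (lo + hi) // 2
--         k, v = SORTED_PAIRS[mid]
--         if k == key:
--             return v
--         if k < key: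
--             lo = mid + 1
--         else:
--             hi = mid
--     return None
-- ===== Notes on version B (the rewrite author's own statement) =====
-- stated objective: alternative
-- what changed: Replaces A's branch chain and linear case-insensitive scans with a binary search over a table of (lowercased, canonical) theme pairs sorted once at module load.
import Mathlib
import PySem

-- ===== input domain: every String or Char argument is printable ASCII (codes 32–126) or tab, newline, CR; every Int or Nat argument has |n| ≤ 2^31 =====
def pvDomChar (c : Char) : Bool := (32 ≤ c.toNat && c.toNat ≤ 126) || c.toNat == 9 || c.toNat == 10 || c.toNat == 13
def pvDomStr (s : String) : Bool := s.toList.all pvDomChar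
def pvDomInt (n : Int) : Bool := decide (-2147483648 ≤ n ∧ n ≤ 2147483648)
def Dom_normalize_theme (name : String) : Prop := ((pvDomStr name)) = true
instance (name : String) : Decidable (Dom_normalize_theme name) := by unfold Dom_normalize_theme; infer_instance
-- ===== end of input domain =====

-- B replaces A's branch chain and linear case-insensitive scans with a binary search over a
-- table of (lowercase, canonical) theme pairs sorted once at module load (alternative algorithm).

-- ===== PORT A =====
-- VALID_EN is a Python set of distinct literals; membership and the at-most-one-hit
-- case-insensitive scan are iteration-order independent, so a list port is exact.
def pvVALID : List String :=
  ["Achiever", "Activator", "Adaptability", "Analytical", "Arranger", "Belief",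
   "Command", "Communication", "Competition", "Connectedness", "Consistency", "Context",
   "Deliberative", "Developer", "Discipline", "Empathy", "Focus", "Futuristic",
   "Harmony", "Ideation", "Includer", "Individualization", "Input", "Intellection",
   "Learner", "Maximizer", "Positivity", "Relator", "Responsibility", "Restorative",
   "Self-Assurance", "Significance", "Strategic", "Woo"]

-- RU_TO_EN = {} (empty dict constant in the module)
def pvRU_TO_EN : PySem.Dict String String := PySem.Dict.empty

def normalize_theme (name : String) : Option String :=
  let name := PySem.Str.strip name
  if name = "" then none
  else if pvVALID.contains name then some name
  else if pvRU_TO_EN.contains name then pvRU_TO_EN.get? name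
  else match pvRU_TO_EN.items.find? (fun p => PySem.Str.lower p.1 == PySem.Str.lower name) with
  | some p => some p.2
  | none =>
    match pvVALID.find? (fun en => PySem.Str.lower en == PySem.Str.lower name) with
    | some en => some en
    | none => none

-- ===== PORT B =====
-- SORTED_PAIRS = sorted((t.lower(), t) for t in VALID_EN): the sorted result is a fixed
-- literal independent of the set's iteration order; transcribed as the sorted literal table.
def pvSORTED_PAIRS : List (String × String) :=
  [("achiever", "Achiever"), ("activator", "Activator"), ("adaptability", "Adaptability"),
   ("analytical", "Analytical"), ("arranger", "Arranger"), ("belief", "Belief"),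
   ("command", "Command"), ("communication", "Communication"), ("competition", "Competition"),
   ("connectedness", "Connectedness"), ("consistency", "Consistency"), ("context", "Context"),
   ("deliberative", "Deliberative"), ("developer", "Developer"), ("discipline", "Discipline"),
   ("empathy", "Empathy"), ("focus", "Focus"), ("futuristic", "Futuristic"),
   ("harmony", "Harmony"), ("ideation", "Ideation"), ("includer", "Includer"),
   ("individualization", "Individualization"), ("input", "Input"), ("intellection", "Intellection"),
   ("learner", "Learner"), ("maximizer", "Maximizer"), ("positivity", "Positivity"),
   ("relator", "Relator"), ("responsibility", "Responsibility"), ("restorative", "Restorative"),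
   ("self-assurance", "Self-Assurance"), ("significance", "Significance"),
   ("strategic", "Strategic"), ("woo", "Woo")]

-- the while-loop of B: binary search on pvSORTED_PAIRS over the half-open window [lo, hi)
def pvBSearch (key : String) (lo hi : Nat) : Option String :=
  if _h : lo < hi then
    match pvSORTED_PAIRS[(lo + hi) / 2]? with
    | none => none   -- unreachable: mid < hi ≤ length
    | some (k, v) =>
      if k = key then some v
      else if k < key then pvBSearch key ((lo + hi) / 2 + 1) hi
      else pvBSearch key lo ((lo + hi) / 2)
  else none
termination_by hi - lo
decreasing_by all_goals omega

def normalize_theme_alt (name : String) : Option String :=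
  pvBSearch (PySem.Str.lower (PySem.Str.strip name)) 0 pvSORTED_PAIRS.length

-- ===== PRECONDITION & SPEC =====
def Spec_normalize_theme (name : String) (out : Option String) : Prop := out = normalize_theme_alt name
instance (name : String) (out : Option String) : Decidable (Spec_normalize_theme name out) := by unfold Spec_normalize_theme; infer_instance

-- ===== CLAIM (what is proved, stated in full; the proofs are below) =====
def Claim_equal_normalize_theme : Prop := ∀ (name : String), Dom_normalize_theme name → Spec_normalize_theme name (normalize_theme name)

-- ===== LEMMAS AND PROOFS =====

-- the table's keys are strictly increasing
theorem pvSorted : List.Pairwise (fun p q : String × String => p.1 < q.1) pvSORTED_PAIRS :=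
  (show List.Pairwise (fun p q : String × String => p.1.toList < q.1.toList) pvSORTED_PAIRS by
    decide).imp (fun h => String.lt_iff_toList_lt.mpr h)

theorem pvKeysNodup : (pvSORTED_PAIRS.map Prod.fst).Nodup := by decide

-- every table entry is (lower t, t) with t ∈ pvVALID
theorem pvTable_sound : ∀ p ∈ pvSORTED_PAIRS, p.1 = PySem.Str.lower p.2 ∧ p.2 ∈ pvVALID := by
  decide

-- every valid theme appears in the table under its lowered key
theorem pvTable_complete : ∀ t ∈ pvVALID, (PySem.Str.lower t, t) ∈ pvSORTED_PAIRS := by decide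

-- with nodup keys, find? returns any member whose key matches
theorem pvFind_of_mem_key {l : List (String × String)} (key : String)
    (hnd : (l.map Prod.fst).Nodup) {p : String × String} (hm : p ∈ l) (hk : p.1 = key) :
    l.find? (fun q => q.1 == key) = some p := by
  induction l with
  | nil => cases hm
  | cons q l ih =>
    simp only [List.map_cons, List.nodup_cons] at hnd
    rcases List.mem_cons.mp hm with rfl | hm'
    · simp [hk]
    · have hq : (q.1 == key) = false := by
        simp only [beq_eq_false_iff_ne]
        intro h
        exact hnd.1 (h ▸ hk ▸ List.mem_map_of_mem hm')
      simp [hq, ih hnd.2 hm']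

theorem pvSorted_mono {i j : Nat} (hij : i < j) (hj : j < pvSORTED_PAIRS.length) :
    pvSORTED_PAIRS[i].1 < pvSORTED_PAIRS[j].1 := by
  exact (List.pairwise_iff_getElem.mp pvSorted) i j (by omega) hj hij

-- binary search over a window containing every matching index computes the assoc lookup
theorem pvBSearch_eq (key : String) :
    ∀ lo hi, hi ≤ pvSORTED_PAIRS.length →
    (∀ i (hi' : i < pvSORTED_PAIRS.length), pvSORTED_PAIRS[i].1 = key → lo ≤ i ∧ i < hi) →
    pvBSearch key lo hi = (pvSORTED_PAIRS.find? (fun p => p.1 == key)).map Prod.snd := by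
  intro lo hi
  induction hhi : hi - lo using Nat.strong_induction_on generalizing lo hi with
  | _ n ih =>
  intro hle hinv
  rw [pvBSearch]
  by_cases h : lo < hi
  · rw [dif_pos h]
    have hmid : (lo + hi) / 2 < pvSORTED_PAIRS.length := by omega
    rw [List.getElem?_eq_getElem hmid]
    set mid := (lo + hi) / 2 with hmiddef
    rcases hkv : pvSORTED_PAIRS[mid] with ⟨k, v⟩
    show (if k = key then some v
          else if k < key then pvBSearch key ((lo + hi) / 2 + 1) hi
          else pvBSearch key lo ((lo + hi) / 2)) = _
    by_cases hk : k = key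
    · have hfound := pvFind_of_mem_key key pvKeysNodup (List.getElem_mem hmid) (by rw [hkv]; exact hk)
      simp [hfound, hkv, hk]
    · simp only [hk, if_false]
      by_cases hlt : k < key
      · simp only [hlt, if_true]
        refine ih (hi - (mid + 1)) (by omega) (mid + 1) hi rfl hle ?_
        intro i hi' hkey
        have h1 := (hinv i hi' hkey).2
        constructor
        · by_contra hcon
          push Not at hcon
          rcases Nat.lt_or_ge i mid with hlt2 | hge
          · have := pvSorted_mono hlt2 hmid
            rw [hkv, hkey] at this
            exact absurd (lt_trans this hlt) (lt_irrefl key)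
          · have : i = mid := by omega
            subst this
            rw [hkv] at hkey
            exact hk hkey
        · exact h1
      · simp only [hlt, if_false]
        have hgt : key < k := lt_of_le_of_ne (le_of_not_gt hlt) (Ne.symm hk)
        refine ih (mid - lo) (by omega) lo mid rfl (by omega) ?_
        intro i hi' hkey
        have h0 := (hinv i hi' hkey).1
        refine ⟨h0, ?_⟩
        by_contra hcon
        push Not at hcon
        rcases Nat.lt_or_ge mid i with hlt2 | hge
        · have := pvSorted_mono hlt2 hi'
          rw [hkv, hkey] at this
          exact absurd (lt_trans hgt this) (lt_irrefl key)
        · have : i = mid := by omega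
          subst this
          rw [hkv] at hkey
          exact hk hkey
  · rw [dif_neg h]
    have hnone : pvSORTED_PAIRS.find? (fun p => p.1 == key) = none := by
      rw [List.find?_eq_none]
      intro p hp
      simp only [beq_iff_eq]
      intro hkey
      obtain ⟨i, hi', hpi⟩ := List.mem_iff_getElem.mp hp
      have := hinv i hi' (by rw [hpi]; exact hkey)
      omega
    rw [hnone]
    rfl

-- B computes the unique case-insensitive lookup
theorem pvAlt_eq (name : String) :
    normalize_theme_alt name =
      (pvSORTED_PAIRS.find? (fun p => p.1 == PySem.Str.lower (PySem.Str.strip name))).map Prod.snd := by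
  unfold normalize_theme_alt
  exact pvBSearch_eq _ 0 _ le_rfl (fun i hi' _ => ⟨Nat.zero_le _, hi'⟩)

-- ===== VERDICT (by name: the statement is the Claim_ definition above) =====
theorem normalize_theme_spec : Claim_equal_normalize_theme := by
  intro name _
  unfold Spec_normalize_theme
  rw [pvAlt_eq]
  unfold normalize_theme
  set s := PySem.Str.strip name with hs
  have hi : (PySem.Dict.empty : PySem.Dict String String).items = [] := rfl
  by_cases he : s = ""
  · rw [he]
    decide
  · rw [if_neg he]
    by_cases hc : pvVALID.contains s
    · rw [if_pos hc]
      have hm : s ∈ pvVALID := by simpa using hc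
      have hfound := pvFind_of_mem_key (PySem.Str.lower s) pvKeysNodup (pvTable_complete s hm) rfl
      rw [hfound]
      rfl
    · rw [if_neg hc]
      rw [if_neg (by simp [pvRU_TO_EN, PySem.Dict.contains_empty])]
      rw [show pvRU_TO_EN.items = [] from hi, List.find?_nil]
      cases hf : pvVALID.find? (fun en => PySem.Str.lower en == PySem.Str.lower s) with
      | some en =>
        have hmm := List.find?_some hf
        have hmem := List.mem_of_find?_eq_some hf
        simp only [beq_iff_eq] at hmm
        have hfound := pvFind_of_mem_key (PySem.Str.lower s) pvKeysNodup
          (pvTable_complete en hmem) hmm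
        rw [hfound]
        rfl
      | none =>
        have hnone : pvSORTED_PAIRS.find? (fun p => p.1 == PySem.Str.lower s) = none := by
          rw [List.find?_eq_none]
          intro p hp
          simp only [beq_iff_eq]
          intro hkey
          obtain ⟨h1, h2⟩ := pvTable_sound p hp
          have := List.find?_eq_none.mp hf p.2 h2
          simp only [beq_iff_eq] at this
          exact this (by rw [← h1, hkey])
        rw [hnone]
        rfl
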